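-- pv_equiv track=rewrite | github.com/yana87gt/procon | aoj/1617.py | check
-- ===== SOURCE A (Python) =====
-- def check(s1,s2):
--     l1 = s1.split('"')
--     l2 = s2.split('"')
--     if len(l1) != len(l2):
--         return "DIFFERENT"
--     close = 0
--     for i in range(len(l1)):
--         if l1[i] != l2[i]:
--             if i % 2 == 0: return "DIFFERENT"
--             else : close += 1
--     if close == 1: return "CLOSE"
--     if close == 0: return "IDENTICAL"
--     return "DIFFERENT"
-- ===== SOURCE B (Python) =====
-- def check(s1, s2):
--     l1 = s1.split('"')
--     l2 = s2.split('"')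
--     if len(l1) != len(l2):
--         return "DIFFERENT"
--     if l1[0::2] != l2[0::2]:
--         return "DIFFERENT"
--     close = sum(a != b for a, b in zip(l1[1::2], l2[1::2]))
--     return ["IDENTICAL", "CLOSE"][close] if close < 2 else "DIFFERENT"
-- ===== Notes on version B (the rewrite author's own statement) =====
-- stated objective: simpler
-- what changed: Replaces the indexed loop with early returns and a running counter by parity slicing: outside-quote segments ([0::2]) are compared as whole lists, inside-quote mismatches are counted with a sum over zip, and the verdict is read off the count.
import Mathlib
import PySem

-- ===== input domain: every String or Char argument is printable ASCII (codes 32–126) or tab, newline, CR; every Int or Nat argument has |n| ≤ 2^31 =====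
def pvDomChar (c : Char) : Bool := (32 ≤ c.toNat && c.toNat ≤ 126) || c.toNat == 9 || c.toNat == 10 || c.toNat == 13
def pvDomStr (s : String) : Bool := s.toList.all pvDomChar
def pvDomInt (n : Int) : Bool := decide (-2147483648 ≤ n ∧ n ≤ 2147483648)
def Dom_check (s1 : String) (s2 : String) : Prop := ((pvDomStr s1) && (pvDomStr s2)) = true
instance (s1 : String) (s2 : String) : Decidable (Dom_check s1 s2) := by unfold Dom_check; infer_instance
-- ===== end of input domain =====

-- B replaces A's indexed loop with parity slicing: the outside-quote segments are compared as
-- whole lists and inside-quote mismatches are counted over a zip (objective: simpler).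

-- s.split('"'): the separator is the nonempty literal '"', so split? is always `some`
def splitQ (s : String) : List String := (PySem.Str.split? s "\"").getD []

-- ===== PORT A =====
-- the for-loop of A: l2's current element is its head (in `check` the two lists have equal
-- length, so this mirrors Python's in-range l2[i]); state (i, close) as in the Python loop
def checkLoopA : List String → List String → Nat → Int → String
  | [], _, _, close =>
      if close = 1 then "CLOSE" else if close = 0 then "IDENTICAL" else "DIFFERENT"
  | a :: as, l2, i, close =>
      let b := l2.headD ""
      if a ≠ b then
        (if i % 2 = 0 then "DIFFERENT" else checkLoopA as l2.tail (i + 1) (close + 1))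
      else checkLoopA as l2.tail (i + 1) close

def check (s1 : String) (s2 : String) : String :=
  let l1 := splitQ s1
  let l2 := splitQ s2
  if l1.length ≠ l2.length then "DIFFERENT"
  else checkLoopA l1 l2 0 0

-- ===== PORT B =====
-- l[0::2] (hand port of the step-2 slice, exact: every other element starting at the head)
def everyOther : List String → List String
  | [] => []
  | [a] => [a]
  | a :: _ :: rest => a :: everyOther rest

def check_alt (s1 : String) (s2 : String) : String :=
  let l1 := splitQ s1
  let l2 := splitQ s2
  if l1.length ≠ l2.length then "DIFFERENT"
  else if everyOther l1 ≠ everyOther l2 then "DIFFERENT"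
  else
    -- sum(a != b for a, b in zip(l1[1::2], l2[1::2]))
    let close : Int := (((everyOther l1.tail).zip (everyOther l2.tail)).countP
        (fun p => p.1 ≠ p.2) : Nat)
    if close < 2 then (if close = 0 then "IDENTICAL" else "CLOSE") else "DIFFERENT"

-- ===== PRECONDITION & SPEC =====
def Spec_check (s1 : String) (s2 : String) (out : String) : Prop := out = check_alt s1 s2
instance (s1 : String) (s2 : String) (out : String) : Decidable (Spec_check s1 s2 out) := by unfold Spec_check; infer_instance

-- ===== CLAIM (what is proved, stated in full; the proofs are below) =====
def Claim_equal_check : Prop := ∀ (s1 : String) (s2 : String), Dom_check s1 s2 → Spec_check s1 s2 (check s1 s2)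

-- ===== LEMMAS AND PROOFS =====

-- elements of l at positions p with (i + p) even / odd
def evensFrom (i : Nat) (l : List String) : List String :=
  if i % 2 = 0 then everyOther l else everyOther l.tail
def oddsFrom (i : Nat) (l : List String) : List String :=
  if i % 2 = 0 then everyOther l.tail else everyOther l

def misCount (xs ys : List String) : Nat :=
  (xs.zip ys).countP (fun p => p.1 ≠ p.2)

def tailVerdict (close : Int) : String :=
  if close = 1 then "CLOSE" else if close = 0 then "IDENTICAL" else "DIFFERENT"

theorem everyOther_cons (a : String) (as : List String) :
    everyOther (a :: as) = a :: everyOther as.tail := by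
  cases as <;> simp [everyOther]

theorem evensFrom_cons (i : Nat) (a : String) (as : List String) :
    evensFrom i (a :: as) =
      if i % 2 = 0 then a :: evensFrom (i + 1) as else evensFrom (i + 1) as := by
  rcases Nat.even_or_odd i with h | h
  · have h0 : i % 2 = 0 := Nat.even_iff.mp h
    have h1 : (i + 1) % 2 = 1 := by omega
    simp [evensFrom, h0, h1, everyOther_cons]
  · have h0 : i % 2 = 1 := Nat.odd_iff.mp h
    have h1 : (i + 1) % 2 = 0 := by omega
    simp [evensFrom, h0, h1, everyOther_cons]

theorem oddsFrom_cons (i : Nat) (a : String) (as : List String) :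
    oddsFrom i (a :: as) =
      if i % 2 = 0 then oddsFrom (i + 1) as else a :: oddsFrom (i + 1) as := by
  rcases Nat.even_or_odd i with h | h
  · have h0 : i % 2 = 0 := Nat.even_iff.mp h
    have h1 : (i + 1) % 2 = 1 := by omega
    simp [oddsFrom, h0, h1, everyOther_cons]
  · have h0 : i % 2 = 1 := Nat.odd_iff.mp h
    have h1 : (i + 1) % 2 = 0 := by omega
    simp [oddsFrom, h0, h1, everyOther_cons]

theorem checkLoopA_cons (a : String) (as : List String) (b : String) (bs : List String)
    (i : Nat) (close : Int) :
    checkLoopA (a :: as) (b :: bs) i close =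
      if a ≠ b then
        (if i % 2 = 0 then "DIFFERENT" else checkLoopA as bs (i + 1) (close + 1))
      else checkLoopA as bs (i + 1) close := by
  simp [checkLoopA]

theorem misCount_cons_eq (a : String) (xs ys : List String) :
    misCount (a :: xs) (a :: ys) = misCount xs ys := by
  simp [misCount]

theorem misCount_cons_ne (a b : String) (xs ys : List String) (hab : a ≠ b) :
    misCount (a :: xs) (b :: ys) = misCount xs ys + 1 := by
  simp [misCount, hab]

theorem checkLoopA_eq (l1 : List String) :
    ∀ (l2 : List String) (i : Nat) (close : Int), l1.length = l2.length →
    checkLoopA l1 l2 i close =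
      if evensFrom i l1 ≠ evensFrom i l2 then "DIFFERENT"
      else tailVerdict (close + (misCount (oddsFrom i l1) (oddsFrom i l2) : Int)) := by
  induction l1 with
  | nil =>
    intro l2 i close hlen
    have : l2 = [] := by cases l2 <;> simp_all
    subst this
    simp [checkLoopA, evensFrom, oddsFrom, everyOther, misCount, tailVerdict]
  | cons a as ih =>
    intro l2 i close hlen
    cases l2 with
    | nil => simp at hlen
    | cons b bs =>
      have hlen' : as.length = bs.length := by simpa using hlen
      rw [checkLoopA_cons, evensFrom_cons, evensFrom_cons, oddsFrom_cons, oddsFrom_cons]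
      by_cases hpar : i % 2 = 0 <;> by_cases hab : a = b
      · subst hab
        rw [ih bs (i + 1) close hlen']
        by_cases h2 : evensFrom (i + 1) as = evensFrom (i + 1) bs <;>
          simp [hpar, h2, misCount]
      · rw [ih bs (i + 1) close hlen']
        simp [hpar, hab]
      · subst hab
        rw [ih bs (i + 1) close hlen']
        by_cases h2 : evensFrom (i + 1) as = evensFrom (i + 1) bs <;>
          simp [hpar, h2, misCount_cons_eq]
      · rw [ih bs (i + 1) (close + 1) hlen']
        by_cases h2 : evensFrom (i + 1) as = evensFrom (i + 1) bs
        · simp [hpar, hab, h2, misCount_cons_ne a b _ _ hab, tailVerdict]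
          ring_nf
        · simp [hpar, hab, h2]

theorem evensFrom_zero (l : List String) : evensFrom 0 l = everyOther l := by
  simp [evensFrom]

theorem oddsFrom_zero (l : List String) : oddsFrom 0 l = everyOther l.tail := by
  simp [oddsFrom]

theorem tailVerdict_eq_alt (n : Nat) :
    tailVerdict (n : Int) =
      if (n : Int) < 2 then (if (n : Int) = 0 then "IDENTICAL" else "CLOSE")
      else "DIFFERENT" := by
  unfold tailVerdict
  split_ifs <;> first | rfl | omega

-- ===== VERDICT (by name: the statement is the Claim_ definition above) =====
theorem check_spec : Claim_equal_check := by
  intro s1 s2 _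
  unfold Spec_check check check_alt
  by_cases hlen : (splitQ s1).length = (splitQ s2).length
  · rw [if_neg (not_not_intro hlen), if_neg (not_not_intro hlen),
      checkLoopA_eq _ _ 0 0 hlen, evensFrom_zero, evensFrom_zero,
      oddsFrom_zero, oddsFrom_zero]
    by_cases he : everyOther (splitQ s1) = everyOther (splitQ s2)
    · rw [if_neg (not_not_intro he), if_neg (not_not_intro he), zero_add,
        tailVerdict_eq_alt]
      rfl
    · rw [if_pos he, if_pos he]
  · rw [if_pos hlen, if_pos hlen]
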